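-- pv_equiv track=rewrite | github.com/oWlogona/Note_Book | notes/views.py | check_unique_words
-- ===== SOURCE A (Python) =====
-- def check_unique_words(line):
--     line = line.lower().split()
--     answer = {item: 0 for item in line}
--     for item in line:
--         if item in answer:
--             answer[item] += 1
--     count_word = 0
--     for item in answer.keys():
--         if answer[item] == 1:
--             count_word += 1
--     return count_word
-- ===== SOURCE B (Python) =====
-- def check_unique_words(line):
--     # sort-then-scan-runs: count maximal runs of length 1 in the sorted word list
--     words = sorted(line.lower().split())
--     count = 0
--     while words:
--         x = words[0]
--         rest = words[1:]
--         run = 0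
--         while run < len(rest) and rest[run] == x:
--             run += 1
--         if run == 0:
--             count += 1
--         words = rest[run:]
--     return count
-- ===== Notes on version B (the rewrite author's own statement) =====
-- stated objective: alternative
-- what changed: Replaces the dict tally (build zero dict, count pass, key-filter pass) with sort-then-scan: sort the words and count maximal runs of equal consecutive words whose length is exactly 1.
import Mathlib
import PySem

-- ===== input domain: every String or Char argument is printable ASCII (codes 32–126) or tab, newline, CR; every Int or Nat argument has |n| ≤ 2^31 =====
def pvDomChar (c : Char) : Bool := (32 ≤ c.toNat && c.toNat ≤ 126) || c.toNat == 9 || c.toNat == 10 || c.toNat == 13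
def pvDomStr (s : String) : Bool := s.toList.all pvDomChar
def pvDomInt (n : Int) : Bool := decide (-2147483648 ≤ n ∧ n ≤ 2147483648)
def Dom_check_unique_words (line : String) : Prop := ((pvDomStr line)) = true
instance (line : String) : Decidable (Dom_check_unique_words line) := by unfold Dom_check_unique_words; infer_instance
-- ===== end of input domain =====

-- B replaces A's dict tally with sort-then-scan-runs (count runs of length 1); alternative decomposition, same result.

-- ===== PORT A =====
def check_unique_words (line : String) : Int :=
  -- line = line.lower().split()
  let words := PySem.Str.split₀ (PySem.Str.lower line)
  -- answer = {item: 0 for item in line}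
  let answer : PySem.Dict String Int :=
    words.foldl (fun d item => d.insert item 0) PySem.Dict.empty
  -- for item in line: if item in answer: answer[item] += 1
  let answer :=
    words.foldl (fun d item => if d.contains item then d.modify item 0 (· + 1) else d) answer
  -- count_word = 0; for item in answer.keys(): if answer[item] == 1: count_word += 1
  answer.keys.foldl (fun c item => if answer.getD item 0 == 1 then c + 1 else c) 0

-- ===== PORT B =====
-- the 'while words' loop of Source B: inner while = takeWhile-length scan, 'words = rest[run:]' = drop run
def pvScanB (words : List String) (count : Int) : Int :=
  match words with
  | [] => count
  | x :: rest =>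
    let run := (rest.takeWhile (fun w => w == x)).length
    pvScanB (rest.drop run) (if run == 0 then count + 1 else count)
termination_by words.length
decreasing_by
  simp only [List.length_cons, List.length_drop]
  omega

def check_unique_words_alt (line : String) : Int :=
  let words := PySem.List.sorted (PySem.Str.split₀ (PySem.Str.lower line)) (fun w => w) false
  pvScanB words 0

-- ===== PRECONDITION & SPEC =====
def Spec_check_unique_words (line : String) (out : Int) : Prop := out = check_unique_words_alt line
instance (line : String) (out : Int) : Decidable (Spec_check_unique_words line out) := by unfold Spec_check_unique_words; infer_instance

-- ===== CLAIM (what is proved, stated in full; the proofs are below) =====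
def Claim_equal_check_unique_words : Prop := ∀ (line : String), Dom_check_unique_words line → Spec_check_unique_words line (check_unique_words line)

-- ===== LEMMAS AND PROOFS =====

-- The common value both sides are reduced to: among the distinct words, those occurring exactly once.
def pvUniqueCount (ws : List String) : Int :=
  ((PySem.Set.ofList ws).countP (fun w => ws.count w == 1) : Int)

-- A side ------------------------------------------------------------------

lemma pvGetD_zero_fold (l : List String) :
    ∀ (d : PySem.Dict String Int), (∀ v, d.getD v 0 = 0) →
      ∀ v, (l.foldl (fun d item => d.insert item 0) d).getD v 0 = 0 := by
  induction l with
  | nil => intro d h v; exact h v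
  | cons x t ih =>
    intro d h v
    simp only [List.foldl_cons]
    refine ih _ ?_ v
    intro w
    rw [PySem.Dict.getD_insert]
    split <;> simp [h]

lemma pvGuard_fold (l : List String) :
    ∀ (d : PySem.Dict String Int), (∀ x ∈ l, d.contains x = true) →
      l.foldl (fun d item => if d.contains item then d.modify item 0 (· + 1) else d) d
        = l.foldl (fun d item => d.modify item 0 (· + 1)) d := by
  induction l with
  | nil => intro d _; rfl
  | cons x t ih =>
    intro d h
    simp only [List.foldl_cons, h x (by simp), if_pos]
    refine ih _ ?_
    intro y hy
    simp [PySem.Dict.contains_modify, h y (by simp [hy])]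

lemma pvSetUpdate_self (l : List String) :
    ∀ s : PySem.Set String, (∀ x ∈ l, x ∈ s) → PySem.Set.update s l = s := by
  induction l with
  | nil => intro s _; rfl
  | cons x t ih =>
    intro s h
    have hxs : x ∈ s := h x (by simp)
    show (t.foldl PySem.Set.add (PySem.Set.add s x)) = s
    rw [show PySem.Set.add s x = s by simp [PySem.Set.add, hxs]]
    exact ih s (fun y hy => h y (by simp [hy]))

lemma pvA_core (words : List String) :
    (List.foldl
        (fun c item =>
          if (List.foldl (fun d item => if d.contains item then d.modify item 0 (· + 1) else d)
                (List.foldl (fun d item => d.insert item 0) (PySem.Dict.empty : PySem.Dict String Int) words) words).getD item 0 == 1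
          then c + 1 else c)
        (0 : Int)
        (List.foldl (fun d item => if d.contains item then d.modify item 0 (· + 1) else d)
            (List.foldl (fun d item => d.insert item 0) (PySem.Dict.empty : PySem.Dict String Int) words) words).keys)
      = pvUniqueCount words := by
  have hk1 : (List.foldl (fun d item => d.insert item 0) (PySem.Dict.empty : PySem.Dict String Int) words).keys
      = PySem.Set.ofList words := by
    rw [PySem.Dict.keys_foldl_insert]
    simp [PySem.Set.update, PySem.Set.ofList_eq_foldl]
  have hg1 : ∀ v, (List.foldl (fun d item => d.insert item 0) (PySem.Dict.empty : PySem.Dict String Int) words).getD v (0:Int) = 0 :=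
    pvGetD_zero_fold words PySem.Dict.empty (fun w => by simp)
  rw [pvGuard_fold words _ (fun x hx => by
    rw [PySem.Dict.contains_iff_mem_keys, hk1]; exact (PySem.Set.mem_ofList ..).2 hx)]
  have hk2 : (List.foldl (fun d item => d.modify item 0 (· + 1))
      (List.foldl (fun d item => d.insert item 0) (PySem.Dict.empty : PySem.Dict String Int) words) words).keys
      = PySem.Set.ofList words := by
    rw [PySem.Dict.keys_foldl_modify, hk1]
    exact pvSetUpdate_self words _ (fun x hx => (PySem.Set.mem_ofList ..).2 hx)
  have hg2 : ∀ v, (List.foldl (fun d item => d.modify item 0 (· + 1))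
      (List.foldl (fun d item => d.insert item 0) (PySem.Dict.empty : PySem.Dict String Int) words) words).getD v (0:Int)
      = (words.count v : Int) := fun v => by
    rw [PySem.Dict.getD_foldl_modify_add_one, hg1, zero_add]
  rw [PySem.List.foldl_if_add_one, hk2, zero_add, pvUniqueCount]
  congr 1
  apply List.countP_congr
  intro w _
  rw [hg2]
  by_cases h : words.count w = 1 <;> simp [h, Nat.cast_eq_one]

lemma pvA_eq (line : String) :
    check_unique_words line = pvUniqueCount (PySem.Str.split₀ (PySem.Str.lower line)) :=
  pvA_core (PySem.Str.split₀ (PySem.Str.lower line))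

-- B side ------------------------------------------------------------------

lemma pvAdd_cons_not_mem (x : String) (t : List String) :
    ∀ s : PySem.Set String, x ∉ t → t.foldl PySem.Set.add (x :: s) = x :: t.foldl PySem.Set.add s := by
  induction t with
  | nil => intro s _; rfl
  | cons y t' ih =>
    intro s hx
    have hyx : ¬ (y = x) := fun h => hx (by simp [h])
    simp only [List.foldl_cons]
    rw [show PySem.Set.add (x :: s) y = x :: PySem.Set.add s y by
      simp only [PySem.Set.add, PySem.Set.contains, List.contains_cons]
      rw [show (y == x) = false by simpa using hyx]
      simp only [Bool.false_or]
      split <;> simp]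
    exact ih _ (fun h => hx (by simp [h]))

lemma pvFoldl_add_const (k : List String) (x : String) :
    (∀ y ∈ k, y = x) → k.foldl PySem.Set.add [x] = [x] := by
  induction k with
  | nil => intro _; rfl
  | cons y k' ih =>
    intro h
    have hy : y = x := h y (by simp)
    subst hy
    simp only [List.foldl_cons]
    rw [show PySem.Set.add [y] y = [y] by simp [PySem.Set.add, PySem.Set.contains]]
    exact ih (fun z hz => h z (by simp [hz]))

lemma pvOfList_run (x : String) (k t : List String) (hk : ∀ y ∈ k, y = x) (ht : x ∉ t) :
    PySem.Set.ofList (x :: (k ++ t)) = x :: PySem.Set.ofList t := by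
  rw [PySem.Set.ofList_eq_foldl, PySem.Set.ofList_eq_foldl]
  simp only [List.foldl_cons, List.foldl_append]
  rw [show PySem.Set.add [] x = [x] by simp [PySem.Set.add, PySem.Set.contains]]
  rw [pvFoldl_add_const k x hk]
  exact pvAdd_cons_not_mem x t [] ht

lemma pvScanB_sorted (n : Nat) : ∀ (ys : List String), ys.length ≤ n →
    ys.Pairwise (· ≤ ·) → ∀ c : Int, pvScanB ys c = c + pvUniqueCount ys := by
  induction n with
  | zero =>
    intro ys h _ c
    have hnil : ys = [] := by cases ys with | nil => rfl | cons a l => simp at h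
    subst hnil
    simp [pvScanB, pvUniqueCount, PySem.Set.ofList]
  | succ n ih =>
    intro ys hlen hs c
    cases ys with
    | nil => simp [pvScanB, pvUniqueCount, PySem.Set.ofList]
    | cons x rest =>
      rw [pvScanB]
      have hkt : rest.takeWhile (fun w => w == x) ++ rest.dropWhile (fun w => w == x) = rest :=
        List.takeWhile_append_dropWhile
      set k := rest.takeWhile (fun w => w == x) with hkdef
      set t := rest.dropWhile (fun w => w == x) with htdef
      have hdrop : rest.drop k.length = t := by
        conv_lhs => rw [← hkt]
        rw [List.drop_left]
      have hkx : ∀ y ∈ k, y = x := by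
        intro y hy
        have := List.mem_takeWhile_imp hy
        simpa using this
      have hrest : ∀ y ∈ rest, x ≤ y := (List.pairwise_cons.mp hs).1
      have hpr : rest.Pairwise (· ≤ ·) := (List.pairwise_cons.mp hs).2
      have hpt : t.Pairwise (· ≤ ·) := hpr.sublist (List.dropWhile_sublist _)
      have hxt : x ∉ t := by
        intro hmem
        obtain ⟨b, t', htc⟩ : ∃ b t', t = b :: t' := by
          cases htt : t with
          | nil => rw [htt] at hmem; simp at hmem
          | cons b t' => exact ⟨b, t', rfl⟩
        have hd : List.dropWhile (fun w => w == x) rest = b :: t' := htdef.symm.trans htc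
        have hne : b ≠ x := by
          have h1 := List.head_dropWhile_not (fun w => w == x)
            (w := show List.dropWhile (fun w => w == x) rest ≠ [] by rw [hd]; simp)
          simp only [hd] at h1
          simpa using h1
        have hbr : b ∈ rest := by rw [← hkt, htc]; simp
        have hxb : x < b := lt_of_le_of_ne (hrest b hbr) (Ne.symm hne)
        rw [htc] at hmem
        rcases List.mem_cons.mp hmem with h | h
        · exact hne h.symm
        · have hpt' : (b :: t').Pairwise (· ≤ ·) := htc ▸ hpt
          have hble : b ≤ x := (List.pairwise_cons.mp hpt').1 x h
          exact absurd hble (not_le.mpr hxb)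
      have hlt : t.length ≤ n := by
        have h1 : t.length ≤ rest.length := (List.dropWhile_sublist _).length_le
        simp at hlen; omega
      rw [hdrop, ih t hlt hpt]
      have hcx : (x :: rest).count x = k.length + 1 := by
        rw [List.count_cons_self]
        conv_lhs => rw [← hkt]
        rw [List.count_append, List.count_eq_zero.mpr hxt,
          List.count_eq_length.mpr (fun b hb => (hkx b hb).symm)]
      have hof : PySem.Set.ofList (x :: rest) = x :: PySem.Set.ofList t := by
        conv_lhs => rw [← hkt]
        exact pvOfList_run x k t hkx hxt
      unfold pvUniqueCount
      rw [hof, List.countP_cons]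
      have hcongr : List.countP (fun w => (x :: rest).count w == 1) (PySem.Set.ofList t)
          = List.countP (fun w => t.count w == 1) (PySem.Set.ofList t) := by
        apply List.countP_congr
        intro w hw
        have hwt : w ∈ t := (PySem.Set.mem_ofList ..).1 hw
        have hwx : w ≠ x := fun h => hxt (h ▸ hwt)
        rw [show List.count w (x :: rest) = List.count w t by
          rw [List.count_cons_of_ne (Ne.symm hwx)]
          conv_lhs => rw [← hkt]
          rw [List.count_append, List.count_eq_zero.mpr (fun hc => hwx (hkx w hc)), Nat.zero_add]]
      rw [hcongr, hcx]
      by_cases hk0 : k.length = 0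
      · simp [hk0]
        ring
      · simp [hk0]
    

lemma pvB_core (ws : List String) :
    pvScanB (PySem.List.sorted ws (fun w => w) false) 0 = pvUniqueCount ws := by
  have hperm : (PySem.List.sorted ws (fun w => w) false).Perm ws := PySem.List.sorted_perm ..
  have hpw : (PySem.List.sorted ws (fun w => w) false).Pairwise (· ≤ ·) := by
    have := PySem.List.sorted_pairwise (xs := ws) (key := fun w => w)
    simpa using this
  rw [pvScanB_sorted (PySem.List.sorted ws (fun w => w) false).length _ le_rfl hpw, zero_add]
  unfold pvUniqueCount
  have hcnt : (fun w => (PySem.List.sorted ws (fun w => w) false).count w == 1)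
      = (fun w => ws.count w == 1) := by
    funext w; rw [hperm.count_eq]
  rw [hcnt]
  congr 1
  apply List.Perm.countP_eq
  rw [List.perm_ext_iff_of_nodup (PySem.Set.nodup_ofList ..) (PySem.Set.nodup_ofList ..)]
  intro a
  simp [PySem.Set.mem_ofList, hperm.mem_iff]

lemma pvB_eq (line : String) :
    check_unique_words_alt line = pvUniqueCount (PySem.Str.split₀ (PySem.Str.lower line)) :=
  pvB_core (PySem.Str.split₀ (PySem.Str.lower line))

-- ===== VERDICT (by name: the statement is the Claim_ definition above) =====
theorem check_unique_words_spec : Claim_equal_check_unique_words := by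
  intro line _
  unfold Spec_check_unique_words
  rw [pvA_eq, pvB_eq]
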